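-- pv_equiv track=rewrite | github.com/marcuslaguardia/Listas-Priscilla | Fundamentos_da_Computacao_etc/listas_fundamentos/lista_de_ex6/ex5.py | achar_maior_numero
-- ===== SOURCE A (Python) =====
-- def achar_maior_numero(matriz):
--     vetor_maior_elemento = []
--     for linha in range(len(matriz)):
--         maior = matriz[linha][0]
--         for i in range(1, len(matriz[linha])):
--             if matriz[linha][i] > maior:
--                 maior = matriz[linha][i]
--         vetor_maior_elemento.append(maior)
--     return vetor_maior_elemento
-- ===== SOURCE B (Python) =====
-- def achar_maior_numero(matriz):
--     return [sorted(linha)[-1] for linha in matriz]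
-- ===== Notes on version B (the rewrite author's own statement) =====
-- stated objective: simpler
-- what changed: Replaces the index-driven running-max double loop with a one-line comprehension that sorts each row and takes its last element.
import Mathlib
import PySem

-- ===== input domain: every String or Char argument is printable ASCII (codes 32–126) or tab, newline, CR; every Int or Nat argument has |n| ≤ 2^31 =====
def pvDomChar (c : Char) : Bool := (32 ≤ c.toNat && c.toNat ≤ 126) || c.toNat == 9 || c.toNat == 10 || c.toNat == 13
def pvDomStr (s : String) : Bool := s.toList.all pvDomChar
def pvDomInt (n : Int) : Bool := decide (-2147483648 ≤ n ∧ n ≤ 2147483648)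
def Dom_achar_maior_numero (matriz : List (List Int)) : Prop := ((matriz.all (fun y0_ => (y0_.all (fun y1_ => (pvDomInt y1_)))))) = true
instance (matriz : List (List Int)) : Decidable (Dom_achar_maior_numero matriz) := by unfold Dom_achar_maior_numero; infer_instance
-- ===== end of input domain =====

-- B replaces A's index-driven running-max double loop with a comprehension that
-- sorts each row and takes its last element (simpler decomposition, not faster).


-- ===== PORT A =====
def achar_maior_numero (matriz : List (List Int)) : List Int :=
  (PySem.List.pyRange 0 (matriz.length : Int) 1).foldl
    (fun vetor linha =>
      vetor ++ [(PySem.List.pyRange 1 ((PySem.List.pyGetD matriz linha []).length : Int) 1).foldl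
        (fun maior i =>
          if PySem.List.pyGetD (PySem.List.pyGetD matriz linha []) i 0 > maior
          then PySem.List.pyGetD (PySem.List.pyGetD matriz linha []) i 0 else maior)
        (PySem.List.pyGetD (PySem.List.pyGetD matriz linha []) 0 0)]) []

-- ===== PORT B =====
def achar_maior_numero_alt (matriz : List (List Int)) : List Int :=
  matriz.map (fun linha => PySem.List.pyGetD (PySem.List.sorted linha (fun x => x) false) (-1) 0)

-- ===== PRECONDITION & SPEC =====
-- A raises IndexError (matriz[linha][0]) on any empty row; B's sorted(linha)[-1] raises there too.
def Pre_achar_maior_numero (matriz : List (List Int)) : Prop := ∀ linha ∈ matriz, linha ≠ []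
instance (matriz : List (List Int)) : Decidable (Pre_achar_maior_numero matriz) := by unfold Pre_achar_maior_numero; infer_instance
def pvWitness_achar_maior_numero : List (List Int) := [[1, 3, 2], [5], [-4, -4]]
def Spec_achar_maior_numero (matriz : List (List Int)) (out : List Int) : Prop := out = achar_maior_numero_alt matriz
instance (matriz : List (List Int)) (out : List Int) : Decidable (Spec_achar_maior_numero matriz out) := by unfold Spec_achar_maior_numero; infer_instance

-- ===== CLAIM (what is proved, stated in full; the proofs are below) =====
def Claim_equal_achar_maior_numero : Prop := ∀ (matriz : List (List Int)), Dom_achar_maior_numero matriz → Pre_achar_maior_numero matriz → Spec_achar_maior_numero matriz (achar_maior_numero matriz)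

-- ===== LEMMAS AND PROOFS =====

-- in a ≤-sorted nonempty list every element is ≤ the last one
theorem pv_le_getLast {s : List Int} (hp : s.Pairwise (· ≤ ·)) (h : s ≠ []) :
    ∀ y ∈ s, y ≤ s.getLast h := by
  induction s with
  | nil => simp at h
  | cons a t ih =>
    intro y hy
    rcases t with _ | ⟨b, u⟩
    · simp at hy; simp [hy]
    · have hp' := (List.pairwise_cons.mp hp)
      rcases List.mem_cons.mp hy with rfl | hy
      · have hb : y ≤ (b :: u).getLast (by simp) :=
          le_trans (hp'.1 b (by simp)) ((ih hp'.2 (by simp)) b (by simp))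
        simpa [List.getLast] using hb
      · simpa [List.getLast] using (ih hp'.2 (by simp)) y hy

-- last of the sorted row = the running max A computes
theorem pv_sorted_last (x : Int) (t : List Int) :
    PySem.List.pyGetD (PySem.List.sorted (x :: t) (fun y => y) false) (-1) 0
      = t.foldl max x := by
  have hne : PySem.List.sorted (x :: t) (fun y => y) false ≠ [] := by
    simp [PySem.List.sorted_eq_nil_iff]
  rw [PySem.List.pyGetD_neg_one _ _ hne]
  set s := PySem.List.sorted (x :: t) (fun y => y) false with hs
  have hperm : s.Perm (x :: t) := PySem.List.sorted_perm _ _ _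
  have hpw : s.Pairwise (· ≤ ·) := by
    simpa using PySem.List.sorted_pairwise (x :: t) (fun y => y)
  have hlastmem : s.getLast hne ∈ x :: t := hperm.mem_iff.mp (List.getLast_mem hne)
  have hfold := PySem.List.le_foldl_max t x
  have hfoldmem : t.foldl max x ∈ x :: t := by
    rcases PySem.List.foldl_max_mem t x with h | h
    · simp [h]
    · simp [h]
  have h1 : s.getLast hne ≤ t.foldl max x := by
    rcases List.mem_cons.mp hlastmem with heq | hm
    · rw [heq]; exact hfold.1
    · exact hfold.2 _ hm
  have h2 : t.foldl max x ≤ s.getLast hne :=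
    pv_le_getLast hpw hne _ (hperm.mem_iff.mpr hfoldmem)
  exact le_antisymm h1 h2

-- ===== VERDICT (by name: the statement is the Claim_ definition above) =====
theorem achar_maior_numero_spec : Claim_equal_achar_maior_numero := by
  intro matriz _ hpre
  unfold Spec_achar_maior_numero achar_maior_numero achar_maior_numero_alt
  rw [PySem.List.foldl_pyRange_zero_pyGetD' matriz []
      (fun vetor row =>
        vetor ++ [(PySem.List.pyRange 1 (row.length : Int) 1).foldl
          (fun maior i =>
            if PySem.List.pyGetD row i 0 > maior then PySem.List.pyGetD row i 0 else maior)
          (PySem.List.pyGetD row 0 0)]) []]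
  rw [PySem.List.foldl_append_singleton_eq_map]
  simp only [List.nil_append]
  apply List.map_congr_left
  intro row hrow
  rcases hx : row with _ | ⟨x, t⟩
  · exact absurd hx (hpre row hrow)
  · rw [pv_sorted_last]
    have hdrop := PySem.List.foldl_pyRange_pyGetD' (x :: t) 0
      (fun maior y => if y > maior then y else maior)
      (PySem.List.pyGetD (x :: t) 0 0) (a := 1) (by omega)
    simp only [Int.toNat_one, List.drop_one, List.tail_cons] at hdrop
    rw [hdrop, PySem.List.pyGetD_zero_cons]
    apply PySem.List.foldl_congr_mem
    intro acc y _
    rw [max_def]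
    split_ifs <;> omega
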